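-- pv_equiv track=rewrite | github.com/KrzysiekBlankiewicz/inf_R_2LO_24-25 | 28.11/krzosikk.py | isMarkerAtLegitPosition
-- ===== SOURCE A (Python) =====
-- def isMarkerAtLegitPosition(table, xPos, yPos):
--     row = table[yPos]
--     currentX = 0
--     inside = False
--     for i in row:
--         if xPos >= currentX and xPos < currentX + i and inside == True:
--             return "legit"
--         if inside == False:
--             inside = True
--         else:
--             inside = False
--
--         currentX = currentX + i
--     return "no legit"
-- ===== SOURCE B (Python) =====
-- def isMarkerAtLegitPosition(table, xPos, yPos):
--     row = table[yPos]
--     prefix = [0]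
--     total = 0
--     for v in row:
--         total += v
--         prefix.append(total)
--     for j in range(1, len(row), 2):
--         if prefix[j] <= xPos < prefix[j + 1]:
--             return "legit"
--     return "no legit"
-- ===== Notes on version B (the rewrite author's own statement) =====
-- stated objective: alternative
-- what changed: B replaces A's single running-sum scan with a toggling inside/outside flag by two staged passes: it first builds a prefix-sum table of segment boundaries, then tests only the odd-indexed (inside) half-open intervals by direct table lookup.
import Mathlib
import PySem

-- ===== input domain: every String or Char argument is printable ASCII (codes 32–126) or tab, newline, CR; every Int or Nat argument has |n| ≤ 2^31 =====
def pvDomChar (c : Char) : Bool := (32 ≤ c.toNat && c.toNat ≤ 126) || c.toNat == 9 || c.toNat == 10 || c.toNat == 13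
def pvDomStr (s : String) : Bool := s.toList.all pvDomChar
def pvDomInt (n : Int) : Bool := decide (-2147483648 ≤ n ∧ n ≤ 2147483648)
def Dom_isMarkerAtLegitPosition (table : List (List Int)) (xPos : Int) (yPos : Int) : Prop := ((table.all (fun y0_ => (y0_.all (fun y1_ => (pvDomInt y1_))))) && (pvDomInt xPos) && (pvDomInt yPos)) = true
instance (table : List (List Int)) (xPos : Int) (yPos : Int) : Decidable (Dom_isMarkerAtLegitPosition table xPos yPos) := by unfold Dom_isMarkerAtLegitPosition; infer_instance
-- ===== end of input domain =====

-- B replaces A's running-flag scan by two staged passes: build a prefix-sum boundary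
-- table, then test the odd-indexed (inside) intervals by table lookup (objective: alternative).

-- ===== PORT A =====
-- Port of A: linear scan with running x and a toggling `inside` flag.
def pvLoopA (x : Int) : List Int → Int → Bool → String
  | [], _, _ => "no legit"
  | i :: rest, cur, inside =>
    if x ≥ cur ∧ x < cur + i ∧ inside = true then "legit"
    else pvLoopA x rest (cur + i) (if inside = false then true else false)

def isMarkerAtLegitPosition (table : List (List Int)) (xPos : Int) (yPos : Int) : String :=
  match PySem.List.pyGet? table yPos with
  | none => ""   -- Python raises IndexError here; excluded by Pre_
  | some row => pvLoopA xPos row 0 false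

-- ===== PORT B =====
-- first pass of B: running total appended to the prefix table (built here front-to-back)
def pvPrefix (total : Int) : List Int → List Int
  | [] => []
  | v :: rest => (total + v) :: pvPrefix (total + v) rest

-- second pass of B: for j in range(1, len(row), 2): test prefix[j] <= x < prefix[j+1]
def pvCheckB (x : Int) (pfx : List Int) : List Int → String
  | [] => "no legit"
  | j :: rest =>
    match PySem.List.pyGet? pfx j, PySem.List.pyGet? pfx (j + 1) with
    | some a, some b => if a ≤ x ∧ x < b then "legit" else pvCheckB x pfx rest
    | _, _ => ""   -- IndexError; unreachable: the range indices are always in bounds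

def isMarkerAtLegitPosition_alt (table : List (List Int)) (xPos : Int) (yPos : Int) : String :=
  match PySem.List.pyGet? table yPos with
  | none => ""   -- Python raises IndexError here; excluded by Pre_
  | some row => pvCheckB xPos (0 :: pvPrefix 0 row) (PySem.List.pyRange 1 row.length 2)

-- ===== PRECONDITION & SPEC =====
-- Pre_ excludes exactly the inputs where `table[yPos]` raises IndexError in both Pythons.
def Pre_isMarkerAtLegitPosition (table : List (List Int)) (_xPos : Int) (yPos : Int) : Prop :=
  PySem.Raise.InRange table.length yPos
instance (table : List (List Int)) (xPos : Int) (yPos : Int) : Decidable (Pre_isMarkerAtLegitPosition table xPos yPos) := by unfold Pre_isMarkerAtLegitPosition; infer_instance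
def pvWitness_isMarkerAtLegitPosition : List (List Int) × Int × Int := ([[2, 3, 1, 4]], 4, 0)

def Spec_isMarkerAtLegitPosition (table : List (List Int)) (xPos : Int) (yPos : Int) (out : String) : Prop := out = isMarkerAtLegitPosition_alt table xPos yPos
instance (table : List (List Int)) (xPos : Int) (yPos : Int) (out : String) : Decidable (Spec_isMarkerAtLegitPosition table xPos yPos out) := by unfold Spec_isMarkerAtLegitPosition; infer_instance

-- ===== CLAIM (what is proved, stated in full; the proofs are below) =====
def Claim_equal_isMarkerAtLegitPosition : Prop := ∀ (table : List (List Int)) (xPos : Int) (yPos : Int), Dom_isMarkerAtLegitPosition table xPos yPos → Pre_isMarkerAtLegitPosition table xPos yPos → Spec_isMarkerAtLegitPosition table xPos yPos (isMarkerAtLegitPosition table xPos yPos)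

-- ===== LEMMAS AND PROOFS =====

-- range(1, m+2, 2) = [1] ++ (range(1, m, 2) shifted by 2)
lemma pyRange_two_step (m : Nat) :
    PySem.List.pyRange 1 ((m : Int) + 2) 2 = 1 :: (PySem.List.pyRange 1 (m : Int) 2).map (· + 2) := by
  rw [PySem.List.pyRange_of_pos _ _ (by norm_num : (0:Int) < 2),
      PySem.List.pyRange_of_pos _ _ (by norm_num : (0:Int) < 2)]
  have hcount : (if (1:Int) < (m : Int) + 2 then ((((m : Int) + 2) - 1 + 2 - 1) / 2).toNat else 0)
      = (if (1:Int) < (m : Int) then (((m : Int) - 1 + 2 - 1) / 2).toNat else 0) + 1 := by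
    split_ifs <;> omega
  rw [hcount, List.range_succ_eq_map, List.map_cons, List.map_map, List.map_map]
  refine congrArg₂ List.cons (by norm_num) (List.map_congr_left ?_)
  intro k _
  simp only [Function.comp_apply]
  push_cast
  ring

-- dropping two front entries of the table matches shifting the indices by 2
lemma pvCheckB_shift (x c0 c1 : Int) (pfx : List Int) (js : List Int)
    (h : ∀ j ∈ js, 0 ≤ j) :
    pvCheckB x (c0 :: c1 :: pfx) (js.map (· + 2)) = pvCheckB x pfx js := by
  induction js with
  | nil => rfl
  | cons j rest ih =>
    have hj : 0 ≤ j := h j (List.mem_cons_self ..)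
    have hjk : j = ((j.toNat : Nat) : Int) := by omega
    have e1 : PySem.List.pyGet? (c0 :: c1 :: pfx) (j + 2) = PySem.List.pyGet? pfx j := by
      rw [hjk]
      have : ((j.toNat : Nat) : Int) + 2 = ((j.toNat + 2 : Nat) : Int) := by push_cast; ring
      rw [this, PySem.List.pyGet?_natCast, PySem.List.pyGet?_natCast]
      rfl
    have e2 : PySem.List.pyGet? (c0 :: c1 :: pfx) (j + 2 + 1) = PySem.List.pyGet? pfx (j + 1) := by
      rw [hjk]
      have h1 : ((j.toNat : Nat) : Int) + 2 + 1 = ((j.toNat + 3 : Nat) : Int) := by push_cast; ring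
      have h2 : ((j.toNat : Nat) : Int) + 1 = ((j.toNat + 1 : Nat) : Int) := by push_cast; ring
      rw [h1, h2, PySem.List.pyGet?_natCast, PySem.List.pyGet?_natCast]
      rfl
    simp only [List.map_cons, pvCheckB, e1, e2]
    cases PySem.List.pyGet? pfx j with
    | none => rfl
    | some a =>
      cases PySem.List.pyGet? pfx (j + 1) with
      | none => rfl
      | some b =>
        simp only []
        split_ifs with hc
        · rfl
        · exact ih (fun j hm => h j (List.mem_cons_of_mem _ hm))

lemma mem_pyRange_one_two_nonneg (j : Int) (m : Int) (hm : j ∈ PySem.List.pyRange 1 m 2) : 0 ≤ j := by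
  have := (PySem.List.mem_pyRange_iff_of_pos (by norm_num : (0:Int) < 2) j).mp hm
  omega

-- main invariant: A's flag-down scan from offset `cur` equals B's table check
lemma loopA_eq_checkB (x : Int) : (row : List Int) → (cur : Int) →
    pvLoopA x row cur false
      = pvCheckB x (cur :: pvPrefix cur row) (PySem.List.pyRange 1 row.length 2)
  | [], cur => by
      simp [pvLoopA, pvPrefix, PySem.List.pyRange, pvCheckB]
  | [v], cur => by
      simp [pvLoopA, pvPrefix]
      norm_num [PySem.List.pyRange]
      simp [pvCheckB]
  | v :: b :: rest', cur => by
      have hlen : ((v :: b :: rest').length : Int) = ((rest'.length : Nat) : Int) + 2 := by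
        simp; ring
      rw [hlen, pyRange_two_step]
      simp only [pvPrefix]
      -- head index j = 1 of the check
      have g1 : PySem.List.pyGet? (cur :: (cur + v) :: (cur + v + b) :: pvPrefix (cur + v + b) rest') (1 : Int)
          = some (cur + v) := by
        have : (1 : Int) = ((1 : Nat) : Int) := rfl
        rw [this, PySem.List.pyGet?_natCast]; rfl
      have g2 : PySem.List.pyGet? (cur :: (cur + v) :: (cur + v + b) :: pvPrefix (cur + v + b) rest') ((1 : Int) + 1)
          = some (cur + v + b) := by
        have : (1 : Int) + 1 = ((2 : Nat) : Int) := rfl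
        rw [this, PySem.List.pyGet?_natCast]; rfl
      rw [pvCheckB, g1, g2]
      -- unfold A's two steps: first toggles the flag up, second does the real test
      have hA1 : pvLoopA x (v :: b :: rest') cur false
          = pvLoopA x (b :: rest') (cur + v) true := by
        simp [pvLoopA]
      have hA2 : pvLoopA x (b :: rest') (cur + v) true
          = if cur + v ≤ x ∧ x < cur + v + b then "legit"
            else pvLoopA x rest' (cur + v + b) false := by
        rw [pvLoopA]
        by_cases h : cur + v ≤ x ∧ x < cur + v + b
        · rw [if_pos (⟨h.1, h.2, rfl⟩ : x ≥ cur + v ∧ x < cur + v + b ∧ true = true), if_pos h]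
        · rw [if_neg (fun hh => h ⟨hh.1, hh.2.1⟩), if_neg h]
          simp
      rw [hA1, hA2]
      simp only []
      split_ifs with h1
      · rfl
      · rw [pvCheckB_shift x cur (cur + v) _ _
            (fun j hj => mem_pyRange_one_two_nonneg j _ hj)]
        have := loopA_eq_checkB x rest' (cur + v + b)
        simpa [pvPrefix] using this

-- ===== VERDICT (by name: the statement is the Claim_ definition above) =====
theorem isMarkerAtLegitPosition_spec : Claim_equal_isMarkerAtLegitPosition := by
  intro table xPos yPos _ _
  unfold Spec_isMarkerAtLegitPosition isMarkerAtLegitPosition isMarkerAtLegitPosition_alt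
  cases PySem.List.pyGet? table yPos with
  | none => rfl
  | some row => exact loopA_eq_checkB xPos row 0
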